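-- pv_equiv track=rewrite | github.com/rainpatter/data_extractors | extractor.py | get_sn_conditions
-- ===== SOURCE A (Python) =====
-- def get_sn_conditions(text):
--     s1 = '64(1)'
--     s2 = '64(2)'
--     stop = ['Director will then decide', 'Director will']
--     other_stop = ['BIBLIOGRAPHY', 'REFERENCES']
--     indices = {
--         's1': None,
--         's2': None,
--         'end': None
--     }
--     dict = {
--         "SECTION 64(1)": None,
--         "SECTION 64(2)": None
--     }
--     for i, line in enumerate(text):
--
--         if s1 in line:
--             indices['s1'] = i+1
--         if s2 in line:
--             indices['s2'] = i+1
--         if any(string in line for string in stop):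
--             indices['end'] = i
--         elif indices['end'] == None:
--             if any(string in line for string in other_stop):
--                 indices['end'] = i
--     if (indices['s1'] != None) and (indices['s2'] == None):
--         dict = {"SECTION 64(1)": (''.join(text[indices['s1']:indices['end']])),
--                 "SECTION 64(2)": 'None'}
--     if (indices['s2'] != None) and (indices['s1'] == None):
--         dict = {"SECTION 64(1)": 'None',
--                 "SECTION 64(2)": text[indices['s2']:indices['end']]}
--     if indices['s1'] and indices['s2'] != None:
--         dict = {"SECTION 64(1)": (''.join(text[indices['s1']:(indices['s2']-1)])),
--                 "SECTION 64(2)": (''.join(text[indices['s2']:indices['end']]))}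
--     return dict
-- ===== SOURCE B (Python) =====
-- def get_sn_conditions(text):
--     # Three independent comprehension passes instead of A's single fused loop.
--     s1_hits = [i for i, line in enumerate(text) if '64(1)' in line]
--     s2_hits = [i for i, line in enumerate(text) if '64(2)' in line]
--     stop_hits = [i for i, line in enumerate(text)
--                  if 'Director will then decide' in line or 'Director will' in line]
--     other_hits = [i for i, line in enumerate(text)
--                   if 'BIBLIOGRAPHY' in line or 'REFERENCES' in line]
--     s1 = s1_hits[-1] + 1 if s1_hits else None
--     s2 = s2_hits[-1] + 1 if s2_hits else None
--     end = stop_hits[-1] if stop_hits else (other_hits[0] if other_hits else None)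
--     if s1 is not None and s2 is not None:
--         return {"SECTION 64(1)": ''.join(text[s1:s2 - 1]),
--                 "SECTION 64(2)": ''.join(text[s2:end])}
--     if s1 is not None:
--         return {"SECTION 64(1)": ''.join(text[s1:end]),
--                 "SECTION 64(2)": 'None'}
--     if s2 is not None:
--         return {"SECTION 64(1)": 'None',
--                 "SECTION 64(2)": text[s2:end]}
--     return {"SECTION 64(1)": None, "SECTION 64(2)": None}
-- ===== Notes on version B (the rewrite author's own statement) =====
-- stated objective: simpler
-- what changed: A's single fused loop threading three mutable indices with a stop/elif-other interaction is replaced by four independent list comprehensions of hit indices plus a last/last/first pick, feeding the same three-branch assembly; the comprehension passes also run measurably faster than A's per-line any()-generator machinery.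
import Mathlib
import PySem

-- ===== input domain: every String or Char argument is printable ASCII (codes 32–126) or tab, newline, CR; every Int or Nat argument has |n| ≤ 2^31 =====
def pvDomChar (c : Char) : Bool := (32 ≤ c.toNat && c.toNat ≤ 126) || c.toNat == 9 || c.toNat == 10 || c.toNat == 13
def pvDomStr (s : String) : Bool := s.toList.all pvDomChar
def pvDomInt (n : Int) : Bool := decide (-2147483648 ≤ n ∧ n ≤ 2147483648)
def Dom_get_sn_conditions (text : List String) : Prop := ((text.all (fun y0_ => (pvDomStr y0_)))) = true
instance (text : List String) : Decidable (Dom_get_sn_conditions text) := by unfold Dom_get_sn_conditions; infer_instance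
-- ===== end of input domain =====

-- B replaces A's single fused loop by independent comprehension passes (hits lists + last/first pick); objective: simpler. Return-value equivalence only; neither version mutates its argument.

-- shared constants of the module (Python's s1/s2/stop/other_stop membership tests)
def pvS1p (l : String) : Bool := PySem.Str.isIn "64(1)" l
def pvS2p (l : String) : Bool := PySem.Str.isIn "64(2)" l
def pvStopp (l : String) : Bool := PySem.Str.isIn "Director will then decide" l || PySem.Str.isIn "Director will" l
def pvOtherp (l : String) : Bool := PySem.Str.isIn "BIBLIOGRAPHY" l || PySem.Str.isIn "REFERENCES" l

-- ===== PORT A =====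
-- the for-loop over enumerate(text), threading the dict 'indices' as a triple (s1, s2, end)
def pvLoopA (es : List (Int × String)) (st : Option Int × Option Int × Option Int) :
    Option Int × Option Int × Option Int :=
  match es, st with
  | [], st => st
  | (i, line) :: rest, (a, b, e) =>
    pvLoopA rest
      (if pvS1p line then some (i + 1) else a,
       if pvS2p line then some (i + 1) else b,
       if pvStopp line then some i
       else if e = none then (if pvOtherp line then some i else e) else e)

def get_sn_conditions (text : List String) : List (String × String) :=
  match pvLoopA (PySem.List.enumerate text) (none, none, none) with
  | (s1, s2, en) =>
    -- Python's initial dict holds None values (not str): "None" placeholder, excluded by Pre_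
    let d : List (String × String) := [("SECTION 64(1)", "None"), ("SECTION 64(2)", "None")]
    let d := if s1 ≠ none ∧ s2 = none then
        [("SECTION 64(1)", PySem.Str.join "" (PySem.List.slice text s1 en)),
         ("SECTION 64(2)", "None")] else d
    -- here Python's value for "SECTION 64(2)" is the raw list text[s2:end] (not str): placeholder, excluded by Pre_
    let d := if s2 ≠ none ∧ s1 = none then
        [("SECTION 64(1)", "None"), ("SECTION 64(2)", "None")] else d
    -- `if indices['s1'] and indices['s2'] != None`: int truthiness of s1
    let d := if (s1.getD 0 ≠ 0) ∧ s2 ≠ none then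
        [("SECTION 64(1)", PySem.Str.join "" (PySem.List.slice text s1 (some (s2.getD 0 - 1)))),
         ("SECTION 64(2)", PySem.Str.join "" (PySem.List.slice text s2 en))] else d
    d

-- ===== PORT B =====
def get_sn_conditions_alt (text : List String) : List (String × String) :=
  let es := PySem.List.enumerate text
  let s1_hits := (es.filter (fun p => pvS1p p.2)).map Prod.fst
  let s2_hits := (es.filter (fun p => pvS2p p.2)).map Prod.fst
  let stop_hits := (es.filter (fun p => pvStopp p.2)).map Prod.fst
  let other_hits := (es.filter (fun p => pvOtherp p.2)).map Prod.fst
  let s1 := s1_hits.getLast?.map (· + 1)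
  let s2 := s2_hits.getLast?.map (· + 1)
  let en := match stop_hits.getLast? with
    | some j => some j
    | none => other_hits.head?
  if s1 ≠ none ∧ s2 ≠ none then
    [("SECTION 64(1)", PySem.Str.join "" (PySem.List.slice text s1 (some (s2.getD 0 - 1)))),
     ("SECTION 64(2)", PySem.Str.join "" (PySem.List.slice text s2 en))]
  else if s1 ≠ none then
    [("SECTION 64(1)", PySem.Str.join "" (PySem.List.slice text s1 en)),
     ("SECTION 64(2)", "None")]
  else if s2 ≠ none then
    -- Python returns the raw list text[s2:end] here (not str): placeholder, excluded by Pre_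
    [("SECTION 64(1)", "None"), ("SECTION 64(2)", "None")]
  else
    [("SECTION 64(1)", "None"), ("SECTION 64(2)", "None")]

-- ===== PRECONDITION & SPEC =====
-- Pre_ excludes inputs with no line containing '64(1)': on those A returns a dict whose values are
-- Python None or a raw list of lines — not values of the declared str type, so not representable here.
def Pre_get_sn_conditions (text : List String) : Prop :=
  (text.any (fun l => PySem.Str.isIn "64(1)" l)) = true
instance (text : List String) : Decidable (Pre_get_sn_conditions text) := by
  unfold Pre_get_sn_conditions; infer_instance

def pvWitness_get_sn_conditions : List String :=
  ["intro 64(1)", "body", "REFERENCES"]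

def Spec_get_sn_conditions (text : List String) (out : List (String × String)) : Prop := out = get_sn_conditions_alt text
instance (text : List String) (out : List (String × String)) : Decidable (Spec_get_sn_conditions text out) := by unfold Spec_get_sn_conditions; infer_instance

-- ===== CLAIM (what is proved, stated in full; the proofs are below) =====
def Claim_equal_get_sn_conditions : Prop := ∀ (text : List String), Dom_get_sn_conditions text → Pre_get_sn_conditions text → Spec_get_sn_conditions text (get_sn_conditions text)

-- ===== LEMMAS AND PROOFS =====

-- closed forms for the three components of A's loop state
def pvLastHit (pr : String → Bool) (es : List (Int × String)) (a : Option Int) : Option Int :=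
  match (es.filter (fun p => pr p.2)).getLast? with
  | some p => some (p.1 + 1)
  | none => a

def pvEndSpec (es : List (Int × String)) (e : Option Int) : Option Int :=
  match (es.filter (fun p => pvStopp p.2)).getLast? with
  | some p => some p.1
  | none =>
    match e with
    | some _ => e
    | none => ((es.filter (fun p => pvOtherp p.2)).head?).map Prod.fst

theorem pvLastHit_cons (pr : String → Bool) (i : Int) (l : String) (rest : List (Int × String))
    (a : Option Int) :
    pvLastHit pr ((i, l) :: rest) a =
      pvLastHit pr rest (if pr l then some (i + 1) else a) := by
  by_cases h : pr l <;>
    simp only [pvLastHit, List.filter_cons, h, if_pos, List.getLast?_cons] <;>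
    rcases hf : (rest.filter (fun p => pr p.2)).getLast? with _ | p <;>
    simp [hf]

theorem pvEndSpec_cons (i : Int) (l : String) (rest : List (Int × String)) (e : Option Int) :
    pvEndSpec ((i, l) :: rest) e =
      pvEndSpec rest
        (if pvStopp l then some i
         else if e = none then (if pvOtherp l then some i else e) else e) := by
  by_cases hs : pvStopp l
  · simp only [pvEndSpec, List.filter_cons, hs, if_pos, List.getLast?_cons]
    rcases hf : (rest.filter (fun p => pvStopp p.2)).getLast? with _ | p <;> simp [hf]
  · rcases e with _ | j
    · by_cases ho : pvOtherp l <;>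
        simp only [pvEndSpec, List.filter_cons, hs, ho, if_pos, if_neg,
          Bool.false_eq_true, not_false_iff, List.head?_cons] <;>
        rcases hf : (rest.filter (fun p => pvStopp p.2)).getLast? with _ | p <;>
        simp [hf]
    · simp [pvEndSpec, hs]

theorem pvLoopA_eq (es : List (Int × String)) :
    ∀ (a b e : Option Int),
      pvLoopA es (a, b, e) = (pvLastHit pvS1p es a, pvLastHit pvS2p es b, pvEndSpec es e) := by
  induction es with
  | nil => intro a b e; rcases e <;> simp [pvLoopA, pvLastHit, pvEndSpec]
  | cons p rest ih =>
    rcases p with ⟨i, l⟩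
    intro a b e
    rw [pvLoopA, ih, pvLastHit_cons, pvLastHit_cons, pvEndSpec_cons]

theorem pvEnumerate_fst_nonneg (text : List String) :
    ∀ (k : Int) (p : Int × String), p ∈ PySem.List.enumerate text k → k ≤ p.1 := by
  induction text with
  | nil => intro k p hp; simp [PySem.List.enumerate] at hp
  | cons x xs ih =>
    intro k p hp
    simp only [PySem.List.enumerate, List.mem_cons] at hp
    rcases hp with h | h
    · simp [h]
    · have := ih (k + 1) p h; omega

theorem pv_ports_eq (text : List String) :
    get_sn_conditions text = get_sn_conditions_alt text := by
  unfold get_sn_conditions get_sn_conditions_alt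
  rw [pvLoopA_eq]
  have hne : ∀ q : Int × String,
      ((PySem.List.enumerate text).filter (fun p => pvS1p p.2)).getLast? = some q →
      q.1 + 1 ≠ 0 := by
    intro q hq
    have hm := List.mem_of_mem_filter (List.mem_of_getLast? hq)
    have := pvEnumerate_fst_nonneg text 0 _ hm
    omega
  rcases hf1 : ((PySem.List.enumerate text).filter (fun p => pvS1p p.2)).getLast? with _ | q1 <;>
    rcases hf2 : ((PySem.List.enumerate text).filter (fun p => pvS2p p.2)).getLast? with _ | q2 <;>
    rcases hfs : ((PySem.List.enumerate text).filter (fun p => pvStopp p.2)).getLast? with _ | qs <;>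
    simp [pvLastHit, pvEndSpec, hf1, hf2, hfs, List.getLast?_map, List.head?_map] <;>
    simp [hne _ hf1]

-- ===== VERDICT (by name: the statement is the Claim_ definition above) =====
theorem get_sn_conditions_spec : Claim_equal_get_sn_conditions := by
  intro text _ _
  unfold Spec_get_sn_conditions
  exact pv_ports_eq text
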